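-- pv_equiv track=rewrite | github.com/Sentineldev/maya-calculator | maya-calculator/convertir_decimal.py | convertir_decimal
-- ===== SOURCE A (Python) =====
-- def convertir_decimal(numero_maya):
--     numero_maya.reverse()
--     resultado = 0
--     for i in range(len(numero_maya)):
--         potencia = 20**i
--         circulos = numero_maya[i]['circulos']*1
--         lineas = numero_maya[i]['lineas']*5
--         resultado += (circulos+lineas)*potencia
--     return resultado
-- ===== SOURCE B (Python) =====
-- def convertir_decimal(numero_maya):
--     # Same observable mutation as A: reverse the argument in place.
--     numero_maya.reverse()
--     resultado = 0
--     # Horner's method over the digits most-significant-first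
--     # (after the in-place reverse, reversed() restores the original order).
--     for d in reversed(numero_maya):
--         resultado = resultado * 20 + d['circulos'] + d['lineas'] * 5
--     return resultado
-- ===== Notes on version B (the rewrite author's own statement) =====
-- stated objective: idiomatic
-- what changed: Replaces the index-and-power loop (20**i recomputed per digit) by Horner's method: a single multiply-accumulate pass most-significant-first, with no indexing and no exponentiation.
import Mathlib
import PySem

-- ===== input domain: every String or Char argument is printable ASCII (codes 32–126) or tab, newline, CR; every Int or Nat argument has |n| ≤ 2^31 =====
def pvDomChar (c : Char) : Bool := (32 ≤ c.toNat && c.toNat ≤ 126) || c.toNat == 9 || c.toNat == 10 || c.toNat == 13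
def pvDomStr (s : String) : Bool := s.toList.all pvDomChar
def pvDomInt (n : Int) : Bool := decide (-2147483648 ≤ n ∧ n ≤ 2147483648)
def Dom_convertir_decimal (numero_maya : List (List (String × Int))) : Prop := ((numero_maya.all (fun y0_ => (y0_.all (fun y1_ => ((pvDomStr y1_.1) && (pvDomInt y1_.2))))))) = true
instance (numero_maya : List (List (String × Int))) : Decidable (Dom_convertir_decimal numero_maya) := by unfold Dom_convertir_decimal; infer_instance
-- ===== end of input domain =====

-- B replaces A's index/20**i loop by Horner's single multiply-accumulate pass (same in-place
-- reverse of the argument as A; the equivalence proved here is about the return value).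

-- ===== PORT A =====
def convertir_decimal (numero_maya : List (List (String × Int))) : Int :=
  let rev := numero_maya.reverse
  (PySem.List.pyRange 0 (PySem.List.len rev) 1).foldl
    (fun resultado i =>
      let potencia : Int := (20 : Int) ^ i.toNat
      let circulos : Int :=
        (PySem.Dict.getD (PySem.Dict.ofList (PySem.List.pyGetD rev i [])) "circulos" 0) * 1
      let lineas : Int :=
        (PySem.Dict.getD (PySem.Dict.ofList (PySem.List.pyGetD rev i [])) "lineas" 0) * 5
      resultado + (circulos + lineas) * potencia)
    0

-- ===== PORT B =====
def convertir_decimal_alt (numero_maya : List (List (String × Int))) : Int :=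
  let rev := numero_maya.reverse
  rev.reverse.foldl
    (fun resultado d =>
      resultado * 20 + PySem.Dict.getD (PySem.Dict.ofList d) "circulos" 0
        + (PySem.Dict.getD (PySem.Dict.ofList d) "lineas" 0) * 5)
    0

-- ===== PRECONDITION & SPEC =====
-- Pre_ excludes exactly the inputs on which Python A raises KeyError: some digit dict
-- lacking the key "circulos" or "lineas".
def Pre_convertir_decimal (numero_maya : List (List (String × Int))) : Prop :=
  (numero_maya.all (fun d =>
    (PySem.Dict.ofList d).contains "circulos" && (PySem.Dict.ofList d).contains "lineas")) = true
instance (numero_maya : List (List (String × Int))) : Decidable (Pre_convertir_decimal numero_maya) := by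
  unfold Pre_convertir_decimal; infer_instance

def pvWitness_convertir_decimal : (List (List (String × Int))) :=
  [[("circulos", 3), ("lineas", 2)], [("circulos", 0), ("lineas", 1)]]

def Spec_convertir_decimal (numero_maya : List (List (String × Int))) (out : Int) : Prop := out = convertir_decimal_alt numero_maya
instance (numero_maya : List (List (String × Int))) (out : Int) : Decidable (Spec_convertir_decimal numero_maya out) := by unfold Spec_convertir_decimal; infer_instance

-- ===== CLAIM (what is proved, stated in full; the proofs are below) =====
def Claim_equal_convertir_decimal : Prop := ∀ (numero_maya : List (List (String × Int))), Dom_convertir_decimal numero_maya → Pre_convertir_decimal numero_maya → Spec_convertir_decimal numero_maya (convertir_decimal numero_maya)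

-- ===== LEMMAS AND PROOFS =====

-- value of one Maya digit (circles + 5·lines)
def pvDigit (d : List (String × Int)) : Int :=
  PySem.Dict.getD (PySem.Dict.ofList d) "circulos" 0
    + (PySem.Dict.getD (PySem.Dict.ofList d) "lineas" 0) * 5

-- positional sum, least-significant digit first (what A computes over the reversed list)
def pvSA (ys : List (List (String × Int))) : Int :=
  ((List.range ys.length).map (fun i => pvDigit (ys.getD i []) * 20 ^ i)).sum

lemma pvSA_concat (u : List (List (String × Int))) (d : List (String × Int)) :
    pvSA (u ++ [d]) = pvSA u + pvDigit d * 20 ^ u.length := by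
  unfold pvSA
  rw [List.length_append, List.length_cons, List.length_nil, List.range_succ,
    List.map_append, List.sum_append]
  congr 1
  · congr 1
    apply List.map_congr_left
    intro i hi
    rw [List.mem_range] at hi
    rw [List.getD_append _ _ _ _ hi]
  · simp [List.getD]

lemma pvHorner_eq (xs : List (List (String × Int))) (r : Int) :
    xs.foldl
      (fun resultado d =>
        resultado * 20 + PySem.Dict.getD (PySem.Dict.ofList d) "circulos" 0
          + (PySem.Dict.getD (PySem.Dict.ofList d) "lineas" 0) * 5) r
    = r * 20 ^ xs.length + pvSA xs.reverse := by
  induction xs generalizing r with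
  | nil => simp [pvSA]
  | cons d t ih =>
    rw [List.foldl_cons, ih, List.reverse_cons, pvSA_concat]
    rw [List.length_cons, List.length_reverse]
    unfold pvDigit
    ring

lemma pvA_eq (nm : List (List (String × Int))) :
    convertir_decimal nm = pvSA nm.reverse := by
  unfold convertir_decimal
  simp only [PySem.List.len_eq, PySem.List.pyRange_one, Int.sub_zero, Int.toNat_natCast,
    List.foldl_map, zero_add, PySem.List.pyGetD_natCast, mul_one]
  rw [PySem.List.foldl_add]
  simp [pvSA, pvDigit]

-- ===== VERDICT (by name: the statement is the Claim_ definition above) =====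
theorem convertir_decimal_spec : Claim_equal_convertir_decimal := by
  intro nm _ _
  unfold Spec_convertir_decimal convertir_decimal_alt
  rw [pvA_eq]
  simp only [List.reverse_reverse]
  rw [pvHorner_eq]
  simp
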